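-- pv_equiv track=rewrite | github.com/takapdayon/atcoder | python/_abc/AtCoderBeginnerContest105/B.py | CakesandDonuts
-- ===== SOURCE A (Python) =====
-- import copy
--
-- def CakesandDonuts(n):
--
--     ans = "No"
--     a = copy.copy(n)
--
--     if n % 7 == 0 or n % 4 == 0:
--         ans = "Yes"
--     else:
--         while a > 0:
--             n -= 7
--             a -= 4
--             if (n > 0 and n % 4 == 0) or (a > 0 and a % 7 == 0):
--                 ans = "Yes"
--
--     return ans
-- ===== SOURCE B (Python) =====
-- def CakesandDonuts(n):
--     # Chicken McNugget closed form for coins 4 and 7 (Frobenius number 17):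
--     # beyond the guard, a positive n is 4a+7b (a,b>=1) iff n > 17 or n in {11, 15}.
--     if n % 4 == 0 or n % 7 == 0:
--         return "Yes"
--     if n > 17 or n in (11, 15):
--         return "Yes"
--     return "No"
-- ===== Notes on version B (the rewrite author's own statement) =====
-- stated objective: simpler
-- what changed: Replaced A's twin-decrement while-loop with the Chicken McNugget closed form for coins 4 and 7: after the divisibility guard, answer Yes exactly when n exceeds the Frobenius number 17 or n is 11 or 15 - no loop at all.
import Mathlib
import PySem

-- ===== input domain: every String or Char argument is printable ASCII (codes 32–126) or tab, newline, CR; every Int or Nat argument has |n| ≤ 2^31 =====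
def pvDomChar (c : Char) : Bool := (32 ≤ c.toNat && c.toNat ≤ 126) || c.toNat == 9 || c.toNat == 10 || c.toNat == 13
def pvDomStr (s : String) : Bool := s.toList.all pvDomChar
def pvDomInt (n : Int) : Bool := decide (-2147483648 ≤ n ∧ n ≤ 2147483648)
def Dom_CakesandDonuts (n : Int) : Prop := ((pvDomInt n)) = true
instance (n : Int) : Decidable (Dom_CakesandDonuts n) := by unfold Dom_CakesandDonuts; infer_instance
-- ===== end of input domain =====

-- B replaces A's twin-decrement while-loop by the loop-free Chicken McNugget closed form
-- for coins 4 and 7 (Frobenius number 17): after the divisibility guard, Yes iff n > 17 or n ∈ {11, 15}.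

-- ===== PORT A =====
-- the while-loop of A: state (ans, n, a); iterates while a > 0
def CakesandDonutsLoop (ans : String) (n a : Int) : String :=
  if _h : a > 0 then
    CakesandDonutsLoop
      (if (n - 7 > 0 ∧ PySem.Int.mod (n - 7) 4 = 0) ∨ (a - 4 > 0 ∧ PySem.Int.mod (a - 4) 7 = 0)
        then "Yes" else ans)
      (n - 7) (a - 4)
  else ans
termination_by a.toNat
decreasing_by omega

def CakesandDonuts (n : Int) : String :=
  if PySem.Int.mod n 7 = 0 ∨ PySem.Int.mod n 4 = 0 then "Yes"
  else CakesandDonutsLoop "No" n n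

-- ===== PORT B =====
def CakesandDonuts_alt (n : Int) : String :=
  if PySem.Int.mod n 4 = 0 ∨ PySem.Int.mod n 7 = 0 then "Yes"
  else if n > 17 ∨ n = 11 ∨ n = 15 then "Yes"
  else "No"

-- ===== PRECONDITION & SPEC =====
def Spec_CakesandDonuts (n : Int) (out : String) : Prop := out = CakesandDonuts_alt n
instance (n : Int) (out : String) : Decidable (Spec_CakesandDonuts n out) := by unfold Spec_CakesandDonuts; infer_instance

-- ===== CLAIM (what is proved, stated in full; the proofs are below) =====
def Claim_equal_CakesandDonuts : Prop := ∀ (n : Int), Dom_CakesandDonuts n → Spec_CakesandDonuts n (CakesandDonuts n)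

-- ===== LEMMAS AND PROOFS =====

lemma mod4 (a : Int) : PySem.Int.mod a 4 = a % 4 := PySem.Int.mod_eq_emod_of_pos (by norm_num)

lemma mod7 (a : Int) : PySem.Int.mod a 7 = a % 7 := PySem.Int.mod_eq_emod_of_pos (by norm_num)

-- the loop's result is either "Yes" or its incoming ans
lemma loop_cases (ans : String) (n a : Int) :
    CakesandDonutsLoop ans n a = "Yes" ∨ CakesandDonutsLoop ans n a = ans := by
  induction ans, n, a using CakesandDonutsLoop.induct with
  | case1 ans n a h ih =>
    rw [CakesandDonutsLoop, dif_pos h]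
    simp only [dite_eq_ite] at ih
    rcases ih with h1 | h1
    · exact Or.inl h1
    · rw [h1]; split_ifs with hc
      · exact Or.inl rfl
      · exact Or.inr rfl
  | case2 ans n a h => rw [CakesandDonutsLoop, dif_neg h]; exact Or.inr rfl

-- characterisation of when the loop yields "Yes"
lemma loop_yes_iff (ans : String) (n a : Int) :
    CakesandDonutsLoop ans n a = "Yes" ↔
      (ans = "Yes" ∨ ∃ k : Int, 1 ≤ k ∧ 4 * (k - 1) < a ∧
        ((n - 7 * k > 0 ∧ (n - 7 * k) % 4 = 0) ∨ (a - 4 * k > 0 ∧ (a - 4 * k) % 7 = 0))) := by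
  induction ans, n, a using CakesandDonutsLoop.induct with
  | case1 ans n a h ih =>
    rw [CakesandDonutsLoop, dif_pos h]
    simp only [dite_eq_ite] at ih
    rw [ih]
    simp only [mod4, mod7]
    constructor
    · rintro (hc | ⟨k, hk1, hk2, hP⟩)
      · split_ifs at hc with hcond
        · exact Or.inr ⟨1, by omega, by omega, by omega⟩
        · exact Or.inl hc
      · exact Or.inr ⟨k + 1, by omega, by omega, by omega⟩
    · rintro (hans | ⟨k, hk1, hk2, hP⟩)
      · left; split_ifs <;> [rfl; exact hans]
      · by_cases hcond : (n - 7 > 0 ∧ (n - 7) % 4 = 0) ∨ (a - 4 > 0 ∧ (a - 4) % 7 = 0)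
        · left; rw [if_pos hcond]
        · right; exact ⟨k - 1, by omega, by omega, by omega⟩
  | case2 ans n a h =>
    rw [CakesandDonutsLoop, dif_neg h]
    constructor
    · exact Or.inl
    · rintro (hans | ⟨k, hk1, hk2, _⟩)
      · exact hans
      · omega

-- ===== VERDICT (by name: the statement is the Claim_ definition above) =====
theorem CakesandDonuts_spec : Claim_equal_CakesandDonuts := by
  intro n _
  unfold Spec_CakesandDonuts CakesandDonuts CakesandDonuts_alt
  by_cases hg : PySem.Int.mod n 7 = 0 ∨ PySem.Int.mod n 4 = 0
  · rw [if_pos hg, if_pos (Or.symm hg)]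
  · rw [if_neg hg, if_neg (fun h => hg (Or.symm h))]
    have h4 : n % 4 ≠ 0 := fun h => hg (Or.inr (by simpa [mod4] using h))
    have h7 : n % 7 ≠ 0 := fun h => hg (Or.inl (by simpa [mod7] using h))
    by_cases hy : n > 17 ∨ n = 11 ∨ n = 15
    · rw [if_pos hy]
      apply (loop_yes_iff "No" n n).mpr
      rcases (show n % 4 = 1 ∨ n % 4 = 2 ∨ n % 4 = 3 by omega) with h | h | h
      · exact Or.inr ⟨3, by omega, by omega, Or.inl ⟨by omega, by omega⟩⟩
      · exact Or.inr ⟨2, by omega, by omega, Or.inl ⟨by omega, by omega⟩⟩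
      · exact Or.inr ⟨1, by omega, by omega, Or.inl ⟨by omega, by omega⟩⟩
    · rw [if_neg hy]
      rcases loop_cases "No" n n with hl | hl
      · exfalso
        rcases (loop_yes_iff "No" n n).mp hl with hno | ⟨k, hk1, hk2, hP⟩
        · exact absurd hno (by decide)
        · rcases hP with ⟨hp1, hp2⟩ | ⟨hp1, hp2⟩
          · obtain ⟨m, hm⟩ : (4:Int) ∣ (n - 7*k) := Int.dvd_of_emod_eq_zero hp2
            have hk' : k = 1 := by omega
            have hm' : m = 1 ∨ m = 2 := by omega
            omega
          · obtain ⟨m, hm⟩ : (7:Int) ∣ (n - 4*k) := Int.dvd_of_emod_eq_zero hp2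
            have hm' : m = 1 := by omega
            have hk' : k = 1 ∨ k = 2 := by omega
            omega
      · exact hl
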